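-- pv_equiv track=rewrite | github.com/Monjyu1101/AiDiy2026 | _cleanup.py | remove_toml_table
-- ===== SOURCE A (Python) =====
-- def remove_toml_table(content: str, table_header: str) -> str:
--     lines = content.splitlines()
--     table_index = None
--     for i, line in enumerate(lines):
--         if line.strip() == table_header:
--             table_index = i
--             break
--
--     if table_index is None:
--         return content if content.endswith("\n") or content == "" else content + "\n"
--
--     next_table_index = len(lines)
--     for i in range(table_index + 1, len(lines)):
--         stripped = lines[i].strip()
--         if stripped.startswith("[") and stripped.endswith("]"):
--             next_table_index = i
--             break
--
--     del lines[table_index:next_table_index]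
--     while lines and lines[-1].strip() == "":
--         lines.pop()
--     return "\n".join(lines).rstrip() + ("\n" if lines else "")
-- ===== SOURCE B (Python) =====
-- def remove_toml_table(content: str, table_header: str) -> str:
--     out = []
--     found = False
--     skipping = False
--     for line in content.splitlines():
--         if not found and line.strip() == table_header:
--             found = True
--             skipping = True
--         elif skipping:
--             s = line.strip()
--             if s.startswith("[") and s.endswith("]"):
--                 skipping = False
--                 out.append(line)
--         else:
--             out.append(line)
--     if not found:
--         return content if content.endswith("\n") or content == "" else content + "\n"
--     while out and out[-1].strip() == "":
--         out.pop()
--     return "\n".join(out).rstrip() + ("\n" if out else "")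
-- ===== Notes on version B (the rewrite author's own statement) =====
-- stated objective: simpler
-- what changed: Replaces A's two separate index-based scans (find header index, find next-table index) plus slice deletion by a single state-machine pass over the lines with found/skipping flags.
import Mathlib
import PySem

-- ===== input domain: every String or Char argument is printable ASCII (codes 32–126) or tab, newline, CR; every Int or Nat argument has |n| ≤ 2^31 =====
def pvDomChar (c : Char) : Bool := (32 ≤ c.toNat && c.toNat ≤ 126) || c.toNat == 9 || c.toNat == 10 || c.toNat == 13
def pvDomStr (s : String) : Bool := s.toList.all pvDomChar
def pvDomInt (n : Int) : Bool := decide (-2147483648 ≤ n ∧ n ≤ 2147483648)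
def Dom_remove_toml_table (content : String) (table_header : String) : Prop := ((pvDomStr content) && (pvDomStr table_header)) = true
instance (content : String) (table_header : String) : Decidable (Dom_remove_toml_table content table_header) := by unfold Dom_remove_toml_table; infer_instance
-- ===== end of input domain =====

-- B replaces A's two index-based scans plus slice deletion by a single state-machine pass
-- over the lines (objective: simpler, one pass; same asymptotic cost).

-- ===== PORT A =====
-- first loop of A: enumerate lines, return index of first line whose strip equals the header
def findHeaderIdxA : List String → String → Nat → Option Nat
  | [], _, _ => none
  | l :: ls, h, i =>
    if PySem.Str.strip l = h then some i else findHeaderIdxA ls h (i + 1)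

-- second loop of A: scan lines from index i for the first '[...]' line, absolute index
def findNextIdxA : List String → Nat → Option Nat
  | [], _ => none
  | l :: ls, i =>
    let s := PySem.Str.strip l
    if PySem.Str.startswith s "[" && PySem.Str.endswith s "]" then some i
    else findNextIdxA ls (i + 1)

-- 'while lines and lines[-1].strip() == "": lines.pop()'  (used verbatim by both Pythons)
def popTrailingBlanks : List String → List String
  | [] => []
  | l :: ls =>
    match popTrailingBlanks ls with
    | [] => if PySem.Str.strip l = "" then [] else [l]
    | x :: xs => l :: x :: xs

def remove_toml_table (content : String) (table_header : String) : String :=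
  let lines := PySem.Str.splitlines content
  match findHeaderIdxA lines table_header 0 with
  | none =>
    if PySem.Str.endswith content "\n" || content = "" then content else content ++ "\n"
  | some ti =>
    let next := (findNextIdxA (lines.drop (ti + 1)) (ti + 1)).getD lines.length
    let kept := lines.take ti ++ lines.drop next   -- del lines[ti:next]
    let kept2 := popTrailingBlanks kept
    PySem.Str.rstrip (PySem.Str.join "\n" kept2) ++ (if kept2 = [] then "" else "\n")

-- ===== PORT B =====
-- single pass: state = (output so far, found?, skipping?)
def loopB : List String → String → (List String × Bool × Bool) → (List String × Bool × Bool)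
  | [], _, st => st
  | line :: rest, h, (out, found, skipping) =>
    if !found && PySem.Str.strip line = h then
      loopB rest h (out, true, true)
    else if skipping then
      let s := PySem.Str.strip line
      if PySem.Str.startswith s "[" && PySem.Str.endswith s "]" then
        loopB rest h (out ++ [line], found, false)
      else
        loopB rest h (out, found, skipping)
    else
      loopB rest h (out ++ [line], found, skipping)

def remove_toml_table_alt (content : String) (table_header : String) : String :=
  match loopB (PySem.Str.splitlines content) table_header ([], false, false) with
  | (out, found, _) =>
    if !found then
      if PySem.Str.endswith content "\n" || content = "" then content else content ++ "\n"
    else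
      let out2 := popTrailingBlanks out
      PySem.Str.rstrip (PySem.Str.join "\n" out2) ++ (if out2 = [] then "" else "\n")

-- ===== PRECONDITION & SPEC =====
def Spec_remove_toml_table (content : String) (table_header : String) (out : String) : Prop := out = remove_toml_table_alt content table_header
instance (content : String) (table_header : String) (out : String) : Decidable (Spec_remove_toml_table content table_header out) := by unfold Spec_remove_toml_table; infer_instance

-- ===== CLAIM (what is proved, stated in full; the proofs are below) =====
def Claim_equal_remove_toml_table : Prop := ∀ (content : String) (table_header : String), Dom_remove_toml_table content table_header → Spec_remove_toml_table content table_header (remove_toml_table content table_header)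

-- ===== LEMMAS AND PROOFS =====

-- what B's skipping mode keeps of the remaining lines: drop until the first '[...]' line
def dropB : List String → List String
  | [] => []
  | l :: ls =>
    let s := PySem.Str.strip l
    if PySem.Str.startswith s "[" && PySem.Str.endswith s "]" then l :: ls else dropB ls

theorem loopB_after (ls : List String) (h : String) :
    ∀ out, loopB ls h (out, true, false) = (out ++ ls, true, false) := by
  induction ls with
  | nil => intro out; simp [loopB]
  | cons x xs ih =>
    intro out
    have h1 : loopB (x :: xs) h (out, true, false) = loopB xs h (out ++ [x], true, false) := by
      simp [loopB]
    rw [h1, ih (out ++ [x])]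
    simp

theorem loopB_skip (ls : List String) (h : String) :
    ∀ out, ((loopB ls h (out, true, true)).1, (loopB ls h (out, true, true)).2.1)
      = (out ++ dropB ls, true) := by
  induction ls with
  | nil => intro out; simp [loopB, dropB]
  | cons x xs ih =>
    intro out
    by_cases hb : (PySem.Chars.startswith (PySem.Chars.strip x.toList) ['['] = true ∧
        PySem.Chars.endswith (PySem.Chars.strip x.toList) [']'] = true)
    · have h1 : loopB (x :: xs) h (out, true, true) = loopB xs h (out ++ [x], true, false) := by
        simp [loopB, hb]
      rw [h1, loopB_after xs h (out ++ [x])]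
      simp [dropB, hb]
    · have h1 : loopB (x :: xs) h (out, true, true) = loopB xs h (out, true, true) := by
        simp [loopB, hb]
      rw [h1, ih out]
      have hd : dropB (x :: xs) = dropB xs := by simp [dropB, hb]
      rw [hd]

theorem findHeaderIdxA_shift (ls : List String) (h : String) :
    ∀ k, findHeaderIdxA ls h (k + 1) = (findHeaderIdxA ls h k).map (· + 1) := by
  induction ls with
  | nil => intro k; simp [findHeaderIdxA]
  | cons x xs ih =>
    intro k
    by_cases hx : PySem.Str.strip x = h
    · simp [findHeaderIdxA, hx]
    · simp only [findHeaderIdxA, if_neg hx]; exact ih (k + 1)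

theorem findNextIdxA_shift (ls : List String) :
    ∀ k, findNextIdxA ls (k + 1) = (findNextIdxA ls k).map (· + 1) := by
  induction ls with
  | nil => intro k; simp [findNextIdxA]
  | cons x xs ih =>
    intro k
    by_cases hb : (PySem.Chars.startswith (PySem.Chars.strip x.toList) ['['] = true ∧
        PySem.Chars.endswith (PySem.Chars.strip x.toList) [']'] = true)
    · simp [findNextIdxA, hb]
    · have e1 : ∀ m : Nat, findNextIdxA (x :: xs) m = findNextIdxA xs (m + 1) := by
        intro m; simp [findNextIdxA, hb]
      rw [e1, e1]
      exact ih (k + 1)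

theorem dropB_of_findNext_some (ls : List String) :
    ∀ j, findNextIdxA ls 0 = some j → ls.drop j = dropB ls := by
  induction ls with
  | nil => intro j hj; simp [findNextIdxA] at hj
  | cons x xs ih =>
    intro j hj
    by_cases hb : (PySem.Chars.startswith (PySem.Chars.strip x.toList) ['['] = true ∧
        PySem.Chars.endswith (PySem.Chars.strip x.toList) [']'] = true)
    · simp [findNextIdxA, hb] at hj
      subst hj
      simp [dropB, hb]
    · simp only [findNextIdxA] at hj
      rw [if_neg (by simpa using hb), show (1 : Nat) = 0 + 1 from rfl,
        findNextIdxA_shift] at hj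
      rcases hmap : findNextIdxA xs 0 with _ | j'
      · rw [hmap] at hj; simp at hj
      · rw [hmap] at hj; simp only [Option.map_some, Option.some.injEq] at hj
        subst hj
        rw [List.drop_succ_cons]
        have hd : dropB (x :: xs) = dropB xs := by simp [dropB, hb]
        rw [hd]
        exact ih j' hmap

theorem dropB_of_findNext_none (ls : List String) :
    findNextIdxA ls 0 = none → dropB ls = [] := by
  induction ls with
  | nil => intro _; simp [dropB]
  | cons x xs ih =>
    intro hj
    by_cases hb : (PySem.Chars.startswith (PySem.Chars.strip x.toList) ['['] = true ∧
        PySem.Chars.endswith (PySem.Chars.strip x.toList) [']'] = true)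
    · simp [findNextIdxA, hb] at hj
    · simp only [findNextIdxA] at hj
      rw [if_neg (by simpa using hb), show (1 : Nat) = 0 + 1 from rfl,
        findNextIdxA_shift] at hj
      rcases hmap : findNextIdxA xs 0 with _ | j'
      · have hd : dropB (x :: xs) = dropB xs := by simp [dropB, hb]
        rw [hd]
        exact ih hmap
      · rw [hmap] at hj; simp at hj

theorem loopB_main (ls : List String) (h : String) :
    ∀ out, ((loopB ls h (out, false, false)).1, (loopB ls h (out, false, false)).2.1)
      = match findHeaderIdxA ls h 0 with
        | none => (out ++ ls, false)
        | some i =>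
          (out ++ (ls.take i ++ ls.drop ((findNextIdxA (ls.drop (i + 1)) (i + 1)).getD ls.length)),
           true) := by
  induction ls with
  | nil => intro out; simp [loopB, findHeaderIdxA]
  | cons x xs ih =>
    intro out
    by_cases hx : PySem.Str.strip x = h
    · -- header found at the head
      have h1 : loopB (x :: xs) h (out, false, false) = loopB xs h (out, true, true) := by
        simp [loopB, hx]
      rw [h1, loopB_skip xs h out]
      have hh : findHeaderIdxA (x :: xs) h 0 = some 0 := by
        simp [findHeaderIdxA, hx]
      rw [hh]
      simp only [List.take_zero, List.nil_append, List.drop_succ_cons, List.length_cons,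
        Nat.zero_add]
      rw [show (1 : Nat) = 0 + 1 from rfl, findNextIdxA_shift]
      rcases hmap : findNextIdxA xs 0 with _ | j
      · simp only [List.drop_zero]
        rw [hmap]
        simp [dropB_of_findNext_none xs hmap, List.drop_length]
      · simp only [List.drop_zero]
        rw [hmap]
        simp only [Option.map_some, Option.getD_some, List.drop_succ_cons]
        rw [dropB_of_findNext_some xs j hmap]
    · -- head does not match
      have h1 : loopB (x :: xs) h (out, false, false) = loopB xs h (out ++ [x], false, false) := by
        simp [loopB, hx]
      rw [h1, ih (out ++ [x])]
      have hh : findHeaderIdxA (x :: xs) h 0 = (findHeaderIdxA xs h 0).map (· + 1) := by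
        simp only [findHeaderIdxA, if_neg hx]
        rw [show (1 : Nat) = 0 + 1 from rfl, findHeaderIdxA_shift]
      rw [hh]
      rcases hi : findHeaderIdxA xs h 0 with _ | i
      · simp
      · simp only [Option.map_some, List.take_succ_cons, List.drop_succ_cons, List.length_cons]
        rcases hn : findNextIdxA (xs.drop (i + 1)) (i + 1) with _ | j
        · rw [findNextIdxA_shift (List.drop (i + 1) xs) (i + 1), hn]
          simp [List.drop_length]
        · rw [findNextIdxA_shift (List.drop (i + 1) xs) (i + 1), hn]
          simp

-- ===== VERDICT (by name: the statement is the Claim_ definition above) =====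
theorem remove_toml_table_spec : Claim_equal_remove_toml_table := by
  intro content table_header _
  unfold Spec_remove_toml_table remove_toml_table remove_toml_table_alt
  have hmain := loopB_main (PySem.Str.splitlines content) table_header []
  rcases hst : loopB (PySem.Str.splitlines content) table_header ([], false, false)
    with ⟨o, f, sk⟩
  rw [hst] at hmain
  rcases hh : findHeaderIdxA (PySem.Str.splitlines content) table_header 0 with _ | i
  · rw [hh] at hmain
    simp only [List.nil_append, Prod.mk.injEq] at hmain
    simp only [hh]
    simp [hmain.2]
  · rw [hh] at hmain
    simp only [List.nil_append, Prod.mk.injEq] at hmain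
    simp only [hh]
    simp [hmain.1, hmain.2]
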